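-- pv_equiv track=rewrite | github.com/colin0brass/geo_gedcom | statistics/collectors/births.py | _categorize_by_season
-- ===== SOURCE A (Python) =====
-- from typing import Any, Iterable, Optional, Dict
--
-- def _categorize_by_season(months: list[int]) -> Dict[str, int]:
--     """
--     Categorize months into seasons (Northern Hemisphere).
--
--     Args:
--         months: List of month numbers
--
--     Returns:
--         Dictionary with season counts
--     """
--     seasons = {
--         'Winter': 0,  # Dec, Jan, Feb
--         'Spring': 0,  # Mar, Apr, May
--         'Summer': 0,  # Jun, Jul, Aug
--         'Fall': 0     # Sep, Oct, Nov
--     }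
--
--     for month in months:
--         if month in [12, 1, 2]:
--             seasons['Winter'] += 1
--         elif month in [3, 4, 5]:
--             seasons['Spring'] += 1
--         elif month in [6, 7, 8]:
--             seasons['Summer'] += 1
--         elif month in [9, 10, 11]:
--             seasons['Fall'] += 1
--
--     return seasons
-- ===== SOURCE B (Python) =====
-- def _categorize_by_season(months: list[int]):
--     season_spec = (
--         ('Winter', (12, 1, 2)),
--         ('Spring', (3, 4, 5)),
--         ('Summer', (6, 7, 8)),
--         ('Fall', (9, 10, 11)),
--     )
--     return {season: sum(months.count(m) for m in ms)
--             for season, ms in season_spec}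
-- ===== Notes on version B (the rewrite author's own statement) =====
-- stated objective: alternative
-- what changed: Replaces A's single pass with a per-element if/elif membership branch by a data-driven season table and staged passes: for each season it sums months.count(m) over that season's three month numbers, so there is no per-element branching at all.
import Mathlib
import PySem

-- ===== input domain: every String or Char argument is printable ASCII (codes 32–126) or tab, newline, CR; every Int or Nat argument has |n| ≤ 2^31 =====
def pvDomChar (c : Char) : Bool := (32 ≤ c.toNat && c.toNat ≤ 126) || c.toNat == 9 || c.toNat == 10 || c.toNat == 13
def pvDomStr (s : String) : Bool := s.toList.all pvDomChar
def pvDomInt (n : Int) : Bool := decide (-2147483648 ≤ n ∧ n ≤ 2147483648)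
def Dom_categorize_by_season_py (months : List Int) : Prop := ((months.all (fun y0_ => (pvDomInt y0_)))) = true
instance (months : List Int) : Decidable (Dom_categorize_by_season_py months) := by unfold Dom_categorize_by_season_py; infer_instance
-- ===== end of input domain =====

-- B replaces A's per-element if/elif branching loop by a data-driven season table:
-- for each season it sums months.count(m) over that season's three months (alternative decomposition).

-- ===== PORT A =====
-- literal port: seasons dict initialised to 0, loop with if/elif chain incrementing in place
def categorize_by_season_py (months : List Int) : List (String × Int) :=
  let seasons : PySem.Dict String Int :=
    ((((PySem.Dict.empty.insert "Winter" 0).insert "Spring" 0).insert "Summer" 0).insert "Fall" 0)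
  (months.foldl (fun d m =>
      if m ∈ ([12, 1, 2] : List Int) then d.insert "Winter" (d.getD "Winter" 0 + 1)
      else if m ∈ ([3, 4, 5] : List Int) then d.insert "Spring" (d.getD "Spring" 0 + 1)
      else if m ∈ ([6, 7, 8] : List Int) then d.insert "Summer" (d.getD "Summer" 0 + 1)
      else if m ∈ ([9, 10, 11] : List Int) then d.insert "Fall" (d.getD "Fall" 0 + 1)
      else d) seasons).items

-- ===== PORT B =====
-- port of Source B: season table; for each (season, ms) the value is sum(months.count(m) for m in ms)
def categorize_by_season_py_alt (months : List Int) : List (String × Int) :=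
  ([("Winter", [12, 1, 2]), ("Spring", [3, 4, 5]),
    ("Summer", [6, 7, 8]), ("Fall", [9, 10, 11])] : List (String × List Int)).map
    (fun p => (p.1, (p.2.map (fun m => PySem.List.count months m)).foldl (· + ·) 0))

-- ===== PRECONDITION & SPEC =====
def Spec_categorize_by_season_py (months : List Int) (out : List (String × Int)) : Prop := out = categorize_by_season_py_alt months
instance (months : List Int) (out : List (String × Int)) : Decidable (Spec_categorize_by_season_py months out) := by unfold Spec_categorize_by_season_py; infer_instance

-- ===== CLAIM (what is proved, stated in full; the proofs are below) =====
def Claim_equal_categorize_by_season_py : Prop := ∀ (months : List Int), Dom_categorize_by_season_py months → Spec_categorize_by_season_py months (categorize_by_season_py months)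

-- ===== LEMMAS AND PROOFS =====

-- invariant of A's loop: the dict keeps the literal four-entry shape, each counter
-- accumulating the number of months of its season
theorem categorize_loop_items (ms : List Int) (w s u f : Int) :
    (ms.foldl (fun d m =>
      if m ∈ ([12, 1, 2] : List Int) then d.insert "Winter" (d.getD "Winter" 0 + 1)
      else if m ∈ ([3, 4, 5] : List Int) then d.insert "Spring" (d.getD "Spring" 0 + 1)
      else if m ∈ ([6, 7, 8] : List Int) then d.insert "Summer" (d.getD "Summer" 0 + 1)
      else if m ∈ ([9, 10, 11] : List Int) then d.insert "Fall" (d.getD "Fall" 0 + 1)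
      else d)
      (PySem.Dict.mk [("Winter", w), ("Spring", s), ("Summer", u), ("Fall", f)])).items
    = [("Winter", w + (ms.count 12 + ms.count 1 + ms.count 2)),
       ("Spring", s + (ms.count 3 + ms.count 4 + ms.count 5)),
       ("Summer", u + (ms.count 6 + ms.count 7 + ms.count 8)),
       ("Fall",   f + (ms.count 9 + ms.count 10 + ms.count 11))] := by
  induction ms generalizing w s u f with
  | nil => simp
  | cons m ms ih =>
    by_cases h1 : m ∈ ([12, 1, 2] : List Int)
    · have : (PySem.Dict.mk [("Winter", w), ("Spring", s), ("Summer", u), ("Fall", f)]).insert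
          "Winter" ((PySem.Dict.mk [("Winter", w), ("Spring", s), ("Summer", u), ("Fall", f)]).getD "Winter" 0 + 1)
          = PySem.Dict.mk [("Winter", w + 1), ("Spring", s), ("Summer", u), ("Fall", f)] := by
        apply PySem.Dict.ext
        simp [PySem.Dict.items_insert, PySem.Dict.getD_eq_get?_getD, PySem.Dict.get?_mk_cons]
      simp only [List.foldl_cons, if_pos h1, this, ih]
      simp only [List.mem_cons, List.not_mem_nil, or_false] at h1
      rcases h1 with h | h | h <;> simp_all <;> omega
    · by_cases h2 : m ∈ ([3, 4, 5] : List Int)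
      · have : (PySem.Dict.mk [("Winter", w), ("Spring", s), ("Summer", u), ("Fall", f)]).insert
            "Spring" ((PySem.Dict.mk [("Winter", w), ("Spring", s), ("Summer", u), ("Fall", f)]).getD "Spring" 0 + 1)
            = PySem.Dict.mk [("Winter", w), ("Spring", s + 1), ("Summer", u), ("Fall", f)] := by
          apply PySem.Dict.ext
          simp [PySem.Dict.items_insert, PySem.Dict.getD_eq_get?_getD, PySem.Dict.get?_mk_cons]
        simp only [List.foldl_cons, if_neg h1, if_pos h2, this, ih]
        simp only [List.mem_cons, List.not_mem_nil, or_false] at h2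
        rcases h2 with h | h | h <;> simp_all <;> omega
      · by_cases h3 : m ∈ ([6, 7, 8] : List Int)
        · have : (PySem.Dict.mk [("Winter", w), ("Spring", s), ("Summer", u), ("Fall", f)]).insert
              "Summer" ((PySem.Dict.mk [("Winter", w), ("Spring", s), ("Summer", u), ("Fall", f)]).getD "Summer" 0 + 1)
              = PySem.Dict.mk [("Winter", w), ("Spring", s), ("Summer", u + 1), ("Fall", f)] := by
            apply PySem.Dict.ext
            simp [PySem.Dict.items_insert, PySem.Dict.getD_eq_get?_getD, PySem.Dict.get?_mk_cons]
          simp only [List.foldl_cons, if_neg h1, if_neg h2, if_pos h3, this, ih]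
          simp only [List.mem_cons, List.not_mem_nil, or_false] at h3
          rcases h3 with h | h | h <;> simp_all <;> omega
        · by_cases h4 : m ∈ ([9, 10, 11] : List Int)
          · have : (PySem.Dict.mk [("Winter", w), ("Spring", s), ("Summer", u), ("Fall", f)]).insert
                "Fall" ((PySem.Dict.mk [("Winter", w), ("Spring", s), ("Summer", u), ("Fall", f)]).getD "Fall" 0 + 1)
                = PySem.Dict.mk [("Winter", w), ("Spring", s), ("Summer", u), ("Fall", f + 1)] := by
              apply PySem.Dict.ext
              simp [PySem.Dict.items_insert, PySem.Dict.getD_eq_get?_getD, PySem.Dict.get?_mk_cons]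
            simp only [List.foldl_cons, if_neg h1, if_neg h2, if_neg h3, if_pos h4, this, ih]
            simp only [List.mem_cons, List.not_mem_nil, or_false] at h4
            rcases h4 with h | h | h <;> simp_all <;> omega
          · simp only [List.foldl_cons, if_neg h1, if_neg h2, if_neg h3, if_neg h4, ih]
            simp_all

-- ===== VERDICT (by name: the statement is the Claim_ definition above) =====
theorem categorize_by_season_py_spec : Claim_equal_categorize_by_season_py := by
  intro months _
  show categorize_by_season_py months = categorize_by_season_py_alt months
  have hinit : ((((PySem.Dict.empty.insert "Winter" (0 : Int)).insert "Spring" 0).insert "Summer" 0).insert "Fall" 0)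
      = PySem.Dict.mk [("Winter", 0), ("Spring", 0), ("Summer", 0), ("Fall", 0)] := by decide
  simp only [categorize_by_season_py, categorize_by_season_py_alt, hinit,
    categorize_loop_items, List.map, PySem.List.count_eq]
  norm_num
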